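-- pv_equiv track=rewrite | github.com/saiganesh6452/whatsapp-automation | app.py | _find_and_truncate_long_cells
-- ===== SOURCE A (Python) =====
-- TRUNCATE_TO = 49000  # leave some room for our truncation suffix
--
-- def _find_and_truncate_long_cells(headers, rows, max_chars=TRUNCATE_TO, preserve_suffix="... (truncated)"):
--     """
--     Returns (new_rows, long_cells) where new_rows is copy with cells longer than max_chars replaced
--     by a truncated version, and long_cells is list of (r_idx, c_idx, original_text).
--     """
--     long_cells = []
--     new_rows = []
--     for r_idx, r in enumerate(rows):
--         row_copy = r[:]
--         for c_idx in range(len(row_copy)):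
--             val = str(row_copy[c_idx] or "")
--             if len(val) > max_chars:
--                 long_cells.append((r_idx, c_idx, val))
--                 truncated = val[:max_chars] + preserve_suffix
--                 row_copy[c_idx] = truncated
--         new_rows.append(row_copy)
--     return new_rows, long_cells
-- ===== SOURCE B (Python) =====
-- def _find_and_truncate_long_cells(headers, rows, max_chars=49000, preserve_suffix="... (truncated)"):
--     # Phase 1: find all long cells (row-major order), recording their index and full text.
--     long_cells = []
--     for r_idx, r in enumerate(rows):
--         for c_idx, cell in enumerate(r):
--             val = str(cell or "")
--             if len(val) > max_chars:
--                 long_cells.append((r_idx, c_idx, val))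
--     # Phase 2: copy every row, then apply the truncations at the recorded indices.
--     new_rows = [r[:] for r in rows]
--     for r_idx, c_idx, val in long_cells:
--         new_rows[r_idx][c_idx] = val[:max_chars] + preserve_suffix
--     return new_rows, long_cells
-- ===== Notes on version B (the rewrite author's own statement) =====
-- stated objective: alternative
-- what changed: Splits A's single interleaved loop into an index phase that collects all long cells and a separate apply phase that copies the rows and patches only the recorded cells in place.
import Mathlib
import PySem

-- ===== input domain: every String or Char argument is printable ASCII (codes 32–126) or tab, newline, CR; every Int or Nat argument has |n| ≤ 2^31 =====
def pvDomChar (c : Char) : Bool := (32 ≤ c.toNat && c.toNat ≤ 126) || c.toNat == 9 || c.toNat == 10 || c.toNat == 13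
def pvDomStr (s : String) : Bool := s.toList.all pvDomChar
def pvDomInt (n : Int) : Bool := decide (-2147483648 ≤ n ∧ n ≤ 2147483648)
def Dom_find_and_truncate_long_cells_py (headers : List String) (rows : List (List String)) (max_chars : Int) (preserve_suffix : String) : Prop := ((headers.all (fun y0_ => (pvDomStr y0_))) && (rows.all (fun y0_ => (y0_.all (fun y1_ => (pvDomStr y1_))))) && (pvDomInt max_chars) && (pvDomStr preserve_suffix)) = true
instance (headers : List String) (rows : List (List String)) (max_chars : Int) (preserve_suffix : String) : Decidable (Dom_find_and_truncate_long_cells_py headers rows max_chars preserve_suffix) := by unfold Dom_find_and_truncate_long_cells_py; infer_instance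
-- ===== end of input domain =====

-- B replaces A's interleaved find-and-truncate loop by an index phase (collect all long
-- cells) followed by an apply phase (copy rows, patch the recorded cells); same cost.

-- ===== PORT A =====
-- inner-loop body: one c_idx step of A's 'for c_idx in range(len(row_copy))'
-- (c_idx always in range, so pyGetD/pySetD are exact here)
def pvA_cell (max_chars : Int) (preserve_suffix : String) (r_idx : Int)
    (st : List String × List (Int × Int × String)) (c_idx : Int) :
    List String × List (Int × Int × String) :=
  let val0 := PySem.List.pyGetD st.1 c_idx ""
  let val := if val0 = "" then "" else val0      -- str(cell or "") on a str cell
  if max_chars < PySem.Str.len val then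
    let truncated := PySem.Str.slice val none (some max_chars) ++ preserve_suffix
    (PySem.List.pySetD st.1 c_idx truncated, st.2 ++ [(r_idx, c_idx, val)])
  else st

def find_and_truncate_long_cells_py (headers : List String) (rows : List (List String)) (max_chars : Int) (preserve_suffix : String) : List (List String) × (List (Int × Int × String)) :=
  let fin := (PySem.List.enumerate rows 0).foldl
    (fun (st : List (Int × Int × String) × List (List String)) p =>
      let inner := (PySem.List.pyRange 0 (PySem.List.len p.2) 1).foldl
        (pvA_cell max_chars preserve_suffix p.1) (p.2, st.1)
      (inner.2, st.2 ++ [inner.1])) ([], [])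
  (fin.2, fin.1)

-- ===== PORT B =====
-- apply phase step: new_rows[r_idx][c_idx] = val[:max_chars] + preserve_suffix
-- (indices recorded in phase 1 are always in range, so pyGetD/pySetD are exact)
def pvB_apply (max_chars : Int) (preserve_suffix : String)
    (nr : List (List String)) (t : Int × Int × String) : List (List String) :=
  let newval := PySem.Str.slice t.2.2 none (some max_chars) ++ preserve_suffix
  PySem.List.pySetD nr t.1 (PySem.List.pySetD (PySem.List.pyGetD nr t.1 []) t.2.1 newval)

-- find phase body: one cell of B's 'for c_idx, cell in enumerate(r)'
def pvB_cell (max_chars : Int) (r_idx : Int)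
    (acc2 : List (Int × Int × String)) (q : Int × String) : List (Int × Int × String) :=
  let val := if q.2 = "" then "" else q.2      -- str(cell or "") on a str cell
  if max_chars < PySem.Str.len val then acc2 ++ [(r_idx, q.1, val)] else acc2

def find_and_truncate_long_cells_py_alt (headers : List String) (rows : List (List String)) (max_chars : Int) (preserve_suffix : String) : List (List String) × (List (Int × Int × String)) :=
  let long_cells := (PySem.List.enumerate rows 0).foldl
    (fun acc p => (PySem.List.enumerate p.2 0).foldl (pvB_cell max_chars p.1) acc) []
  let new_rows := rows.map (fun r => r)
  (long_cells.foldl (pvB_apply max_chars preserve_suffix) new_rows, long_cells)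

-- ===== PRECONDITION & SPEC =====
def Spec_find_and_truncate_long_cells_py (headers : List String) (rows : List (List String)) (max_chars : Int) (preserve_suffix : String) (out : List (List String) × (List (Int × Int × String))) : Prop := out = find_and_truncate_long_cells_py_alt headers rows max_chars preserve_suffix
instance (headers : List String) (rows : List (List String)) (max_chars : Int) (preserve_suffix : String) (out : List (List String) × (List (Int × Int × String))) : Decidable (Spec_find_and_truncate_long_cells_py headers rows max_chars preserve_suffix out) := by unfold Spec_find_and_truncate_long_cells_py; infer_instance

-- ===== CLAIM (what is proved, stated in full; the proofs are below) =====
def Claim_equal_find_and_truncate_long_cells_py : Prop := ∀ (headers : List String) (rows : List (List String)) (max_chars : Int) (preserve_suffix : String), Dom_find_and_truncate_long_cells_py headers rows max_chars preserve_suffix → Spec_find_and_truncate_long_cells_py headers rows max_chars preserve_suffix (find_and_truncate_long_cells_py headers rows max_chars preserve_suffix)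

-- ===== LEMMAS AND PROOFS =====

def pvTrunc (m : Int) (s v : String) : String := PySem.Str.slice v none (some m) ++ s

def pvRowSpec (m : Int) (s : String) (row : List String) : List String :=
  row.map (fun v => if m < PySem.Str.len v then pvTrunc m s v else v)

def pvCellsRow (m : Int) (r c0 : Int) (row : List String) : List (Int × Int × String) :=
  (PySem.List.enumerate row c0).filterMap
    (fun q => if m < PySem.Str.len q.2 then some (r, q.1, q.2) else none)

def pvCellsFrom (m : Int) (r0 : Int) (rows : List (List String)) : List (Int × Int × String) :=
  (PySem.List.enumerate rows r0).flatMap (fun p => pvCellsRow m p.1 0 p.2)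

theorem pv_or_empty (v : String) : (if v = "" then "" else v) = v := by
  split <;> simp_all

theorem pv_getD_append {α : Type} (pre : List α) (x : α) (post : List α) (d : α) :
    (pre ++ x :: post).getD pre.length d = x := by
  induction pre with
  | nil => rfl
  | cons a t ih => simpa using ih

theorem pv_set_append {α : Type} (pre : List α) (x : α) (post : List α) (v : α) :
    (pre ++ x :: post).set pre.length v = pre ++ v :: post := by
  induction pre with
  | nil => rfl
  | cons a t ih => simpa using ih

theorem pv_cellsRow_nil (m r c0 : Int) : pvCellsRow m r c0 [] = [] := by
  simp [pvCellsRow, PySem.List.enumerate_nil]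

theorem pv_cellsRow_cons (m r c0 : Int) (x : String) (t : List String) :
    pvCellsRow m r c0 (x :: t)
      = (if m < PySem.Str.len x then [(r, c0, x)] else []) ++ pvCellsRow m r (c0 + 1) t := by
  simp only [pvCellsRow, PySem.List.enumerate_cons, List.filterMap_cons]
  by_cases hl : m < PySem.Str.len x
  · rw [if_pos hl, if_pos hl]
    rfl
  · rw [if_neg hl, if_neg hl]
    rfl

theorem pv_A_inner (m : Int) (s : String) (r : Int) :
    ∀ (todo done : List String) (acc : List (Int × Int × String)),
    (PySem.List.pyRange (done.length : Int) ((done.length : Int) + todo.length) 1).foldl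
      (pvA_cell m s r) (done ++ todo, acc)
    = (done ++ pvRowSpec m s todo, acc ++ pvCellsRow m r (done.length : Int) todo) := by
  intro todo
  induction todo with
  | nil =>
    intro done acc
    simp [pvRowSpec, pv_cellsRow_nil, PySem.List.pyRange]
  | cons x t ih =>
    intro done acc
    have hb : (done.length : Int) < (done.length : Int) + (x :: t).length := by
      simp only [List.length_cons]; push_cast; omega
    rw [PySem.List.pyRange_one_cons hb]
    simp only [List.foldl_cons]
    have hget : PySem.List.pyGetD (done ++ x :: t) (done.length : Int) "" = x := by
      rw [PySem.List.pyGetD_natCast]; exact pv_getD_append done x t ""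
    have hbnd : (done.length : Int) + ((x :: t).length : Int)
        = (done.length : Int) + 1 + (t.length : Int) := by simp only [List.length_cons]; push_cast; omega
    by_cases hl : m < (x.length : Int)
    · have hlS : m < PySem.Str.len x := by rw [PySem.Str.len_eq]; simpa using hl
      have hstep : pvA_cell m s r (done ++ x :: t, acc) (done.length : Int)
          = (done ++ pvTrunc m s x :: t, acc ++ [(r, (done.length : Int), x)]) := by
        simp only [pvA_cell]
        rw [hget, pv_or_empty, if_pos hlS, PySem.List.pySetD_natCast, pv_set_append]
        rfl
      rw [hstep]
      have hIH := ih (done ++ [pvTrunc m s x]) (acc ++ [(r, (done.length : Int), x)])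
      have hlen : (((done ++ [pvTrunc m s x]).length : Nat) : Int) = (done.length : Int) + 1 := by
        simp
      rw [hlen] at hIH
      have harr : done ++ pvTrunc m s x :: t = (done ++ [pvTrunc m s x]) ++ t := by simp
      rw [harr, hbnd, hIH]
      simp [pvRowSpec, pv_cellsRow_cons, pvTrunc, hl]
    · have hlS : ¬ m < PySem.Str.len x := by rw [PySem.Str.len_eq]; simpa using hl
      have hstep : pvA_cell m s r (done ++ x :: t, acc) (done.length : Int)
          = (done ++ x :: t, acc) := by
        simp only [pvA_cell]
        rw [hget, pv_or_empty, if_neg hlS]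
      rw [hstep]
      have hIH := ih (done ++ [x]) acc
      have hlen : (((done ++ [x]).length : Nat) : Int) = (done.length : Int) + 1 := by simp
      rw [hlen] at hIH
      have harr : done ++ x :: t = (done ++ [x]) ++ t := by simp
      rw [harr, hbnd, hIH]
      simp [pvRowSpec, pv_cellsRow_cons, pvTrunc, hl]

theorem pv_A_outer (m : Int) (s : String) :
    ∀ (rows : List (List String)) (r0 : Int) (acc : List (Int × Int × String))
      (nracc : List (List String)),
    (PySem.List.enumerate rows r0).foldl
      (fun (st : List (Int × Int × String) × List (List String)) p =>
        let inner := (PySem.List.pyRange 0 (PySem.List.len p.2) 1).foldl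
          (pvA_cell m s p.1) (p.2, st.1)
        (inner.2, st.2 ++ [inner.1])) (acc, nracc)
    = (acc ++ pvCellsFrom m r0 rows, nracc ++ rows.map (pvRowSpec m s)) := by
  intro rows
  induction rows with
  | nil => intro r0 acc nracc; simp [pvCellsFrom, PySem.List.enumerate_nil]
  | cons row rest ih =>
    intro r0 acc nracc
    rw [PySem.List.enumerate_cons]
    simp only [List.foldl_cons]
    have h0 : (PySem.List.pyRange 0 (PySem.List.len row) 1).foldl
        (pvA_cell m s r0) (row, acc)
        = (pvRowSpec m s row, acc ++ pvCellsRow m r0 0 row) := by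
      have := pv_A_inner m s r0 row [] acc
      simpa [PySem.List.len_eq] using this
    simp only [h0]
    rw [ih (r0 + 1) (acc ++ pvCellsRow m r0 0 row) (nracc ++ [pvRowSpec m s row])]
    simp [pvCellsFrom, PySem.List.enumerate_cons]

theorem pv_B_cells_row (m : Int) :
    ∀ (row : List String) (r c0 : Int) (acc : List (Int × Int × String)),
    (PySem.List.enumerate row c0).foldl (pvB_cell m r) acc
    = acc ++ pvCellsRow m r c0 row := by
  intro row
  induction row with
  | nil => intro r c0 acc; simp [pv_cellsRow_nil, PySem.List.enumerate_nil]
  | cons x t ih =>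
    intro r c0 acc
    rw [PySem.List.enumerate_cons, List.foldl_cons]
    by_cases hl : m < PySem.Str.len x
    · have hstep : pvB_cell m r acc (c0, x) = acc ++ [(r, c0, x)] := by
        simp only [pvB_cell]
        rw [pv_or_empty, if_pos hl]
      rw [hstep, ih r (c0 + 1) (acc ++ [(r, c0, x)])]
      rw [pv_cellsRow_cons, if_pos hl]
      simp
    · have hstep : pvB_cell m r acc (c0, x) = acc := by
        simp only [pvB_cell]
        rw [pv_or_empty, if_neg hl]
      rw [hstep, ih r (c0 + 1) acc]
      rw [pv_cellsRow_cons, if_neg hl]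
      simp

theorem pv_B_cells (m : Int) :
    ∀ (rows : List (List String)) (r0 : Int) (acc : List (Int × Int × String)),
    (PySem.List.enumerate rows r0).foldl
      (fun acc p => (PySem.List.enumerate p.2 0).foldl (pvB_cell m p.1) acc) acc
    = acc ++ pvCellsFrom m r0 rows := by
  intro rows
  induction rows with
  | nil => intro r0 acc; simp [pvCellsFrom, PySem.List.enumerate_nil]
  | cons row rest ih =>
    intro r0 acc
    rw [PySem.List.enumerate_cons]
    simp only [List.foldl_cons]
    rw [pv_B_cells_row m row r0 0 acc]
    rw [ih (r0 + 1) (acc ++ pvCellsRow m r0 0 row)]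
    simp [pvCellsFrom, PySem.List.enumerate_cons]

theorem pv_B_apply_row (m : Int) (s : String) :
    ∀ (todo doneC : List String) (pre post : List (List String)),
    (pvCellsRow m (pre.length : Int) (doneC.length : Int) todo).foldl
      (pvB_apply m s) (pre ++ (doneC ++ todo) :: post)
    = pre ++ (doneC ++ pvRowSpec m s todo) :: post := by
  intro todo
  induction todo with
  | nil => intro doneC pre post; simp [pv_cellsRow_nil, pvRowSpec]
  | cons x t ih =>
    intro doneC pre post
    rw [pv_cellsRow_cons]
    by_cases hl : m < PySem.Str.len x
    · have hl' : m < (x.length : Int) := by rw [PySem.Str.len_eq] at hl; simpa using hl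
      rw [if_pos hl]
      simp only [List.singleton_append, List.foldl_cons]
      have hstep : pvB_apply m s (pre ++ (doneC ++ x :: t) :: post)
          ((pre.length : Int), (doneC.length : Int), x)
          = pre ++ (doneC ++ pvTrunc m s x :: t) :: post := by
        simp only [pvB_apply, PySem.List.pyGetD_natCast, PySem.List.pySetD_natCast]
        rw [pv_getD_append, pv_set_append, pv_set_append]
        rfl
      rw [hstep]
      have harr : doneC ++ pvTrunc m s x :: t = (doneC ++ [pvTrunc m s x]) ++ t := by simp
      have hlen : (((doneC ++ [pvTrunc m s x]).length : Nat) : Int) = (doneC.length : Int) + 1 := by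
        simp
      rw [harr, ← hlen, ih (doneC ++ [pvTrunc m s x]) pre post]
      simp [pvRowSpec, pvTrunc, hl']
    · have hl' : ¬ m < (x.length : Int) := by rw [PySem.Str.len_eq] at hl; simpa using hl
      rw [if_neg hl, List.nil_append]
      have harr : doneC ++ x :: t = (doneC ++ [x]) ++ t := by simp
      have hlen : (((doneC ++ [x]).length : Nat) : Int) = (doneC.length : Int) + 1 := by simp
      rw [harr, ← hlen, ih (doneC ++ [x]) pre post]
      simp [pvRowSpec, pvTrunc, hl']

theorem pv_B_apply (m : Int) (s : String) :
    ∀ (rest pre : List (List String)),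
    (pvCellsFrom m (pre.length : Int) rest).foldl (pvB_apply m s) (pre ++ rest)
    = pre ++ rest.map (pvRowSpec m s) := by
  intro rest
  induction rest with
  | nil => intro pre; simp [pvCellsFrom, PySem.List.enumerate_nil]
  | cons row rest' ih =>
    intro pre
    have hsplit : pvCellsFrom m (pre.length : Int) (row :: rest')
        = pvCellsRow m (pre.length : Int) 0 row ++ pvCellsFrom m ((pre.length : Int) + 1) rest' := by
      simp [pvCellsFrom, PySem.List.enumerate_cons]
    rw [hsplit, List.foldl_append]
    have h1 : (pvCellsRow m (pre.length : Int) 0 row).foldl (pvB_apply m s)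
        (pre ++ row :: rest') = pre ++ pvRowSpec m s row :: rest' := by
      have := pv_B_apply_row m s row [] pre rest'
      simpa using this
    rw [h1]
    have harr : pre ++ pvRowSpec m s row :: rest' = (pre ++ [pvRowSpec m s row]) ++ rest' := by simp
    have hlen : (((pre ++ [pvRowSpec m s row]).length : Nat) : Int) = (pre.length : Int) + 1 := by
      simp
    rw [harr, ← hlen, ih (pre ++ [pvRowSpec m s row])]
    simp

-- ===== VERDICT (by name: the statement is the Claim_ definition above) =====
theorem find_and_truncate_long_cells_py_spec : Claim_equal_find_and_truncate_long_cells_py := by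
  intro headers rows m s _
  unfold Spec_find_and_truncate_long_cells_py
  unfold find_and_truncate_long_cells_py find_and_truncate_long_cells_py_alt
  rw [pv_A_outer m s rows 0 [] []]
  rw [pv_B_cells m rows 0 []]
  have hmap : rows.map (fun r => r) = rows := by simp
  rw [hmap]
  have := pv_B_apply m s rows []
  simpa using this.symm
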